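-- pv_equiv track=rewrite | github.com/huangyunict/euler_project | solutions/solution_98.py | get_chart_digit_map
-- ===== SOURCE A (Python) =====
-- def get_chart_digit_map(word: str, square: str) -> dict[str, str]:
--     d = dict()  # map from character to digit
--     assert len(word) == len(square)
--     for i in range(len(word)):
--         si = square[i]
--         wi = word[i]
--         if wi not in d:
--             d[wi] = si
--         else:
--             if d.get(wi) != si:
--                 return dict()
--     return d
-- ===== SOURCE B (Python) =====
-- def get_chart_digit_map(word: str, square: str) -> dict[str, str]:
--     # Build the full candidate mapping in one shot, then validate it in a
--     # separate pass; an inconsistent mapping yields the empty dict.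
--     assert len(word) == len(square)
--     d = dict(zip(word, square))
--     if all(d[w] == s for w, s in zip(word, square)):
--         return d
--     return dict()
-- ===== Notes on version B (the rewrite author's own statement) =====
-- stated objective: simpler
-- what changed: Replaces A's interleaved first-occurrence-check loop (insert-if-absent, compare-else-bail) with a build-table-then-validate decomposition: construct the whole mapping with dict(zip(word, square)) and then check every pair against it in a second pass.
import Mathlib
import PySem

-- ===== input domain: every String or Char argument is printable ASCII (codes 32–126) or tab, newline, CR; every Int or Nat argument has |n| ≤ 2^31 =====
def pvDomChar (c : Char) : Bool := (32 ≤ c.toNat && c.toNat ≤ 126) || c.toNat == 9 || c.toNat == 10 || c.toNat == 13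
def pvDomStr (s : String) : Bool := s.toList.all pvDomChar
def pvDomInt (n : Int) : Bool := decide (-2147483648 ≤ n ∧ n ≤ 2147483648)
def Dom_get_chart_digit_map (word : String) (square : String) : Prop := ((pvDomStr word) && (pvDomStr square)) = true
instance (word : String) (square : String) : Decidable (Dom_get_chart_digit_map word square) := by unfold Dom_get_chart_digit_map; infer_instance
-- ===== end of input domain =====

-- B replaces A's interleaved insert-if-absent/compare-else-bail loop with a
-- build-table-then-validate decomposition (dict(zip(...)) then a checking pass);
-- same O(n) cost, simpler structure.

-- ===== PORT A =====
-- the loop 'for i in range(len(word))' over the index pairs (word[i], square[i]);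
-- returning PySem.Dict.empty transcribes the early 'return dict()'
def pvALoop : List (Char × Char) → PySem.Dict Char Char → PySem.Dict Char Char
  | [], d => d
  | (wi, si) :: rest, d =>
    match d.get? wi with
    | none => pvALoop rest (d.insert wi si)
    | some v => if v ≠ si then PySem.Dict.empty else pvALoop rest d

def get_chart_digit_map (word : String) (square : String) : List (String × String) :=
  (pvALoop (word.toList.zip square.toList) PySem.Dict.empty).items.map
    (fun p => (String.singleton p.1, String.singleton p.2))

-- ===== PORT B =====
-- d = dict(zip(word, square)); if all(d[w] == s for w, s in zip(word, square)): return d; return dict()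
def get_chart_digit_map_alt (word : String) (square : String) : List (String × String) :=
  let ps := word.toList.zip square.toList
  let d := PySem.Dict.ofList ps
  if ps.all (fun p => d.get? p.1 == some p.2) then
    d.items.map (fun p => (String.singleton p.1, String.singleton p.2))
  else []

-- ===== PRECONDITION & SPEC =====
-- Pre_ excludes exactly the inputs on which A's 'assert len(word) == len(square)' raises AssertionError
def Pre_get_chart_digit_map (word : String) (square : String) : Prop :=
  word.toList.length = square.toList.length
instance (word : String) (square : String) : Decidable (Pre_get_chart_digit_map word square) := by
  unfold Pre_get_chart_digit_map; infer_instance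

def pvWitness_get_chart_digit_map : String × String := ("care", "1029")

def Spec_get_chart_digit_map (word : String) (square : String) (out : List (String × String)) : Prop := out = get_chart_digit_map_alt word square
instance (word : String) (square : String) (out : List (String × String)) : Decidable (Spec_get_chart_digit_map word square out) := by unfold Spec_get_chart_digit_map; infer_instance

-- ===== CLAIM (what is proved, stated in full; the proofs are below) =====
def Claim_equal_get_chart_digit_map : Prop := ∀ (word : String) (square : String), Dom_get_chart_digit_map word square → Pre_get_chart_digit_map word square → Spec_get_chart_digit_map word square (get_chart_digit_map word square)

-- ===== LEMMAS AND PROOFS =====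

-- all pairs with equal keys carry equal values (what B's validation pass tests)
def pvConsistent (ps : List (Char × Char)) : Prop :=
  ∀ p ∈ ps, ∀ q ∈ ps, p.1 = q.1 → p.2 = q.2

-- the accumulator's entries agree with every pair of ps (A's running invariant)
def pvCompat (d : PySem.Dict Char Char) (ps : List (Char × Char)) : Prop :=
  ∀ p ∈ ps, ∀ v, d.get? p.1 = some v → v = p.2

lemma pv_consistent_tail {p : Char × Char} {rest : List (Char × Char)}
    (h : pvConsistent (p :: rest)) : pvConsistent rest :=
  fun a ha b hb => h a (List.mem_cons_of_mem _ ha) b (List.mem_cons_of_mem _ hb)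

lemma pv_insert_eq_self (d : PySem.Dict Char Char) (k v : Char)
    (hnd : d.keys.Nodup) (h : d.get? k = some v) : d.insert k v = d := by
  apply PySem.Dict.ext
  rw [PySem.Dict.items_insert_of_contains d v (by
    rw [PySem.Dict.contains_eq_isSome_get?, h]; rfl)]
  have hid : ∀ p ∈ d.items, (if (p.1 == k) = true then (k, v) else p) = p := by
    intro p hp
    obtain ⟨p1, p2⟩ := p
    by_cases hk : p1 = k
    · subst hk
      have hget : d.get? p1 = some p2 :=
        PySem.Dict.get?_of_mem_items d hp hnd
      have hv : v = p2 := by rw [h] at hget; injection hget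
      subst hv
      simp
    · simp [hk]
  rw [List.map_congr_left hid]
  simp

lemma pv_loopA_eq_foldl (ps : List (Char × Char)) (d : PySem.Dict Char Char)
    (hnd : d.keys.Nodup) (h1 : pvConsistent ps) (h2 : pvCompat d ps) :
    pvALoop ps d = ps.foldl (fun d p => d.insert p.1 p.2) d := by
  induction ps generalizing d with
  | nil => rfl
  | cons p rest ih =>
    obtain ⟨w, s⟩ := p
    cases hg : d.get? w with
    | none =>
      simp only [pvALoop, hg, List.foldl_cons]
      exact ih (d.insert w s) (PySem.Dict.nodup_keys_insert d w s hnd)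
        (pv_consistent_tail h1)
        (by
          intro q hq v hv
          by_cases hk : q.1 = w
          · rw [hk, PySem.Dict.get?_insert_self] at hv
            have hsv : s = v := by injection hv
            have hsq : s = q.2 :=
              h1 (w, s) (List.mem_cons_self ..) q (List.mem_cons_of_mem _ hq) hk.symm
            rw [← hsv, hsq]
          · rw [PySem.Dict.get?_insert_of_ne d s hk] at hv
            exact h2 q (List.mem_cons_of_mem _ hq) v hv)
    | some v =>
      have hv : v = s := h2 (w, s) (List.mem_cons_self ..) v hg
      simp only [pvALoop, hg, List.foldl_cons]
      rw [if_neg (by simp [hv])]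
      rw [pv_insert_eq_self d w s hnd (hv ▸ hg)]
      exact ih d hnd (pv_consistent_tail h1)
        (fun q hq => h2 q (List.mem_cons_of_mem _ hq))

lemma pv_loopA_eq_empty (ps : List (Char × Char)) (d : PySem.Dict Char Char)
    (h : ¬ (pvConsistent ps ∧ pvCompat d ps)) : pvALoop ps d = PySem.Dict.empty := by
  induction ps generalizing d with
  | nil =>
    exact absurd ⟨fun p hp => absurd hp (List.not_mem_nil),
                  fun p hp => absurd hp (List.not_mem_nil)⟩ h
  | cons p rest ih =>
    obtain ⟨w, s⟩ := p
    cases hg : d.get? w with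
    | none =>
      simp only [pvALoop, hg]
      apply ih
      intro ⟨h1, h2⟩
      apply h
      refine ⟨?_, ?_⟩
      · -- pvConsistent ((w,s) :: rest)
        intro a ha b hb hab
        rcases List.mem_cons.mp ha with rfl | ha' <;>
          rcases List.mem_cons.mp hb with rfl | hb'
        · rfl
        · exact h2 b hb' s (by rw [show b.1 = (w, s).1 from hab.symm, PySem.Dict.get?_insert_self])
        · exact (h2 a ha' s (by rw [show a.1 = (w, s).1 from hab, PySem.Dict.get?_insert_self])).symm
        · exact h1 a ha' b hb' hab
      · -- pvCompat d ((w,s) :: rest)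
        intro q hq v hv
        rcases List.mem_cons.mp hq with rfl | hq'
        · simp [hg] at hv
        · by_cases hk : q.1 = w
          · rw [hk, hg] at hv; cases hv
          · exact h2 q hq' v (by rw [PySem.Dict.get?_insert_of_ne d s hk]; exact hv)
    | some v =>
      by_cases hv : v = s
      · simp only [pvALoop, hg]
        rw [if_neg (by simp [hv])]
        apply ih
        intro ⟨h1, h2⟩
        apply h
        refine ⟨?_, ?_⟩
        · intro a ha b hb hab
          rcases List.mem_cons.mp ha with rfl | ha' <;>
            rcases List.mem_cons.mp hb with rfl | hb'
          · rfl
          · exact h2 b hb' s (by rw [show b.1 = (w, s).1 from hab.symm]; exact hv ▸ hg)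
          · exact (h2 a ha' s (by rw [show a.1 = (w, s).1 from hab]; exact hv ▸ hg)).symm
          · exact h1 a ha' b hb' hab
        · intro q hq u hu
          rcases List.mem_cons.mp hq with rfl | hq'
          · have hvu : v = u := by
              have := hg.symm.trans hu
              injection this
            rw [← hvu, hv]
          · exact h2 q hq' u hu
      · simp only [pvALoop, hg]
        rw [if_pos (by simp [hv])]

-- B's dict(zip(...)) is the overwrite fold (definitional)
lemma pv_ofList_eq_foldl (ps : List (Char × Char)) :
    PySem.Dict.ofList ps = ps.foldl (fun d p => d.insert p.1 p.2) PySem.Dict.empty := rfl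

lemma pv_get?_foldl (ps : List (Char × Char)) (d : PySem.Dict Char Char) (k : Char) :
    (ps.foldl (fun d p => d.insert p.1 p.2) d).get? k =
      ((ps.reverse.find? (fun q => q.1 == k)).map Prod.snd).or (d.get? k) := by
  induction ps generalizing d with
  | nil => simp
  | cons p rest ih =>
    simp only [List.foldl_cons, List.reverse_cons, List.find?_append]
    rw [ih]
    cases hf : rest.reverse.find? (fun q => q.1 == k) with
    | some q => simp
    | none =>
      simp only [Option.map_none, Option.none_or]
      by_cases hk : k = p.1
      · subst hk
        simp [List.find?, PySem.Dict.get?_insert_self]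
      · rw [PySem.Dict.get?_insert_of_ne d p.2 hk]
        have hb : (p.1 == k) = false := by
          simp only [beq_eq_false_iff_ne, ne_eq]
          exact fun h => hk h.symm
        simp [List.find?, hb]

lemma pv_all_iff (ps : List (Char × Char)) :
    (ps.all (fun p => (PySem.Dict.ofList ps).get? p.1 == some p.2) = true) ↔ pvConsistent ps := by
  constructor
  · intro h p hp q hq hpq
    have hp' := List.all_eq_true.mp h p hp
    have hq' := List.all_eq_true.mp h q hq
    simp only [beq_iff_eq] at hp' hq'
    rw [hpq] at hp'
    rw [hp'] at hq'
    injection hq'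
  · intro h
    apply List.all_eq_true.mpr
    intro p hp
    simp only [beq_iff_eq]
    rw [pv_ofList_eq_foldl, pv_get?_foldl]
    have hsome : (ps.reverse.find? (fun q => q.1 == p.1)).isSome := by
      rw [List.find?_isSome]
      exact ⟨p, List.mem_reverse.mpr hp, by simp⟩
    obtain ⟨q, hq⟩ := Option.isSome_iff_exists.mp hsome
    have hqmem : q ∈ ps := List.mem_reverse.mp (List.mem_of_find?_eq_some hq)
    have hqk : q.1 = p.1 := by simpa using List.find?_some hq
    have hqv : q.2 = p.2 := h q hqmem p hp hqk
    simp [hq, hqv]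

lemma pv_compat_empty (ps : List (Char × Char)) : pvCompat PySem.Dict.empty ps := by
  intro p hp v hv
  rw [PySem.Dict.get?_empty] at hv
  cases hv

-- ===== VERDICT (by name: the statement is the Claim_ definition above) =====
theorem get_chart_digit_map_spec : Claim_equal_get_chart_digit_map := by
  intro word square _ _
  unfold Spec_get_chart_digit_map get_chart_digit_map get_chart_digit_map_alt
  set ps := word.toList.zip square.toList with hps
  by_cases hC : pvConsistent ps
  · rw [if_pos ((pv_all_iff ps).mpr hC)]
    rw [pv_loopA_eq_foldl ps PySem.Dict.empty (PySem.Dict.nodup_keys_empty) hC (pv_compat_empty ps)]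
    rw [pv_ofList_eq_foldl]
  · rw [if_neg (fun h => hC ((pv_all_iff ps).mp h))]
    rw [pv_loopA_eq_empty ps PySem.Dict.empty (fun h => hC h.1)]
    rfl
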